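-- pv_equiv track=rewrite | github.com/sushiljacksparrow/dev-mates-practice | shortest_palindrom.py | possiblePalindrome
-- ===== SOURCE A (Python) =====
-- def possiblePalindrome(left: int, right: int, s: str) -> bool:
--     flag = True
--     while left >= 0 and right < len(s):
--         if s[left] != s[right]:
--             flag = False
--             break
--         left = left - 1
--         right = right + 1
--     if flag:
--         return True
--     return False
-- ===== SOURCE B (Python) =====
-- def possiblePalindrome(left: int, right: int, s: str) -> bool:
--     n = max(0, min(left + 1, len(s) - right))
--     return s[left - n + 1:left + 1][::-1] == s[right:right + n]
-- ===== Notes on version B (the rewrite author's own statement) =====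
-- stated objective: simpler
-- what changed: Replaces A's character-by-character while-loop expansion with a closed-form count of comparable pairs n = max(0, min(left+1, len(s)-right)) and a single slice equality s[left-n+1:left+1][::-1] == s[right:right+n].
-- outside the precondition, e.g. on possiblePalindrome(5, 0, 'ab'): A raises IndexError, B returns False; on possiblePalindrome(1, -1, 'ab'): A returns True, B returns False; on possiblePalindrome(0, -1, 'ab'): A returns False, B returns False
import Mathlib
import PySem

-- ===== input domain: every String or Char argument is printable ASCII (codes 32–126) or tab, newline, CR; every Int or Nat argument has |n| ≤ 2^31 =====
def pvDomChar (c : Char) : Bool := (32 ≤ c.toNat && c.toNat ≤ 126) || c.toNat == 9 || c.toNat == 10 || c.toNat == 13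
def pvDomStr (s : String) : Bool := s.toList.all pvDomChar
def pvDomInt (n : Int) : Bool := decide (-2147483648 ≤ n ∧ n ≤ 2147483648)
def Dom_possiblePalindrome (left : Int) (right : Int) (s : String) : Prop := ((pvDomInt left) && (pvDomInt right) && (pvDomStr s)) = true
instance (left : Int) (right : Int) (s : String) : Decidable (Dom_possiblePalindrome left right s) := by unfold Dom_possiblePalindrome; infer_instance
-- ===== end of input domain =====

-- B replaces A's character-by-character expansion loop by a closed-form pair count and one
-- slice comparison (objective: simpler). Pre_ restricts to the natural index domain: it excludes
-- inputs where A raises IndexError and inputs with a negative in-range `right`, where A's value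
-- comes from Python's negative-index wraparound.


-- ===== PORT A =====
-- the while loop of A: state (left, right), returns the final `flag`
def pvLoopA (cs : List Char) (left right : Int) : Bool :=
  if _h : 0 ≤ left ∧ right < (cs.length : Int) then
    match PySem.List.pyGet? cs left, PySem.List.pyGet? cs right with
    | some a, some b => if a ≠ b then false else pvLoopA cs (left - 1) (right + 1)
    | _, _ => false        -- IndexError in Python; outside Pre_
  else true
termination_by ((cs.length : Int) - right).toNat
decreasing_by omega

def possiblePalindrome (left : Int) (right : Int) (s : String) : Bool :=
  pvLoopA s.toList left right

-- ===== PORT B =====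
def possiblePalindrome_alt (left : Int) (right : Int) (s : String) : Bool :=
  let cs := s.toList
  let n := max 0 (min (left + 1) ((cs.length : Int) - right))
  -- s[left-n+1:left+1][::-1] == s[right:right+n]  ([::-1] ported as List.reverse)
  (PySem.List.slice cs (some (left - n + 1)) (some (left + 1))).reverse
    == PySem.List.slice cs (some right) (some (right + n))

-- ===== PRECONDITION & SPEC =====
-- Pre_ excludes inputs where A raises IndexError (left ≥ len(s) or right < -len(s), with
-- right < len(s) and left ≥ 0), and inputs with -len(s) ≤ right < 0, where A still returns but
-- its value is an artefact of Python's negative-index wraparound, outside the natural index domain.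
def Pre_possiblePalindrome (left : Int) (right : Int) (s : String) : Prop :=
  left < 0 ∨ (s.toList.length : Int) ≤ right ∨ (left < (s.toList.length : Int) ∧ 0 ≤ right)
instance (left : Int) (right : Int) (s : String) : Decidable (Pre_possiblePalindrome left right s) := by unfold Pre_possiblePalindrome; infer_instance
def pvWitness_possiblePalindrome : Int × Int × String := (1, 2, "abba")

def Spec_possiblePalindrome (left : Int) (right : Int) (s : String) (out : Bool) : Prop := out = possiblePalindrome_alt left right s
instance (left : Int) (right : Int) (s : String) (out : Bool) : Decidable (Spec_possiblePalindrome left right s out) := by unfold Spec_possiblePalindrome; infer_instance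

-- ===== CLAIM (what is proved, stated in full; the proofs are below) =====
def Claim_equal_possiblePalindrome : Prop := ∀ (left : Int) (right : Int) (s : String), Dom_possiblePalindrome left right s → Pre_possiblePalindrome left right s → Spec_possiblePalindrome left right s (possiblePalindrome left right s)

-- ===== LEMMAS AND PROOFS =====

-- a slice with equal bounds is empty
theorem pvSlice_self {α : Type} (cs : List α) (a : Int) :
    PySem.List.slice cs (some a) (some a) = [] := by
  have h := PySem.List.length_slice cs a a
  exact List.eq_nil_of_length_eq_zero (by omega)

-- peel the LAST element of a slice: cs[a:l+1] = cs[a:l] ++ [cs[l]]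
theorem pvSlice_snoc (cs : List Char) (a l : Int) (ha : 0 ≤ a) (hal : a ≤ l)
    (hl : l < (cs.length : Int)) :
    PySem.List.slice cs (some a) (some (l + 1)) =
      PySem.List.slice cs (some a) (some l) ++ [cs[l.toNat]'(by omega)] := by
  rw [PySem.List.slice_toNat cs ha (show (0:Int) ≤ l+1 by omega),
      PySem.List.slice_toNat cs ha (show (0:Int) ≤ l by omega)]
  have h1 : (l + 1).toNat - a.toNat = (l.toNat - a.toNat) + 1 := by omega
  rw [h1, List.take_add_one]
  congr 1
  have h2 : (cs.drop a.toNat)[l.toNat - a.toNat]? = cs[a.toNat + (l.toNat - a.toNat)]? := by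
    exact List.getElem?_drop
  have h3 : a.toNat + (l.toNat - a.toNat) = l.toNat := by omega
  rw [h2, h3, List.getElem?_eq_getElem (by omega)]
  rfl

-- peel the FIRST element of a slice: cs[r:r+(k+1)] = cs[r] :: cs[r+1:r+1+k]
theorem pvSlice_cons (cs : List Char) (r : Int) (k : Nat) (hr : 0 ≤ r)
    (hrl : r < (cs.length : Int)) :
    PySem.List.slice cs (some r) (some (r + ((k:Int) + 1))) =
      cs[r.toNat]'(by omega) :: PySem.List.slice cs (some (r + 1)) (some ((r + 1) + (k:Int))) := by
  rw [PySem.List.slice_toNat cs hr (show (0:Int) ≤ r + ((k:Int)+1) by omega),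
      PySem.List.slice_toNat cs (show (0:Int) ≤ r+1 by omega) (show (0:Int) ≤ (r+1) + (k:Int) by omega)]
  have h1 : (r + ((k:Int)+1)).toNat - r.toNat = k + 1 := by omega
  have h2 : ((r+1) + (k:Int)).toNat - (r+1).toNat = k := by omega
  have h3 : (r + 1).toNat = r.toNat + 1 := by omega
  rw [h1, h2, h3]
  rw [List.drop_eq_getElem_cons (l := cs) (i := r.toNat) (by omega)]
  rfl

-- the loop of A equals the slice comparison, for any remaining pair count m
theorem pvLoop_eq_slices (cs : List Char) :
    ∀ (m : Nat) (l r : Int), -1 ≤ l → l < (cs.length : Int) → 0 ≤ r →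
      r ≤ (cs.length : Int) → min (l + 1) ((cs.length : Int) - r) = (m : Int) →
      pvLoopA cs l r =
        ((PySem.List.slice cs (some (l - m + 1)) (some (l + 1))).reverse
          == PySem.List.slice cs (some r) (some (r + m))) := by
  intro m
  induction m with
  | zero =>
    intro l r h1 h2 h3 h4 hm
    have hcond : ¬ (0 ≤ l ∧ r < (cs.length : Int)) := by omega
    rw [pvLoopA]
    simp only [hcond, dite_false]
    have hl : l - (0:Nat) + 1 = l + 1 := by push_cast; ring
    have hr : r + (0:Nat) = r := by push_cast; ring
    rw [hl, hr, pvSlice_self, pvSlice_self]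
    rfl
  | succ k ih =>
    intro l r h1 h2 h3 h4 hm
    have hl0 : 0 ≤ l := by omega
    have hrl : r < (cs.length : Int) := by omega
    have hlk : (k : Int) ≤ l := by omega
    rw [pvLoopA]
    have hcond : 0 ≤ l ∧ r < (cs.length : Int) := ⟨hl0, hrl⟩
    simp only [hcond, and_self, dite_true]
    have hgl : PySem.List.pyGet? cs l = some (cs[l.toNat]'(by omega)) := by
      simp [PySem.List.pyGet?, PySem.List.pyIdx?, hl0, h2]
    have hgr : PySem.List.pyGet? cs r = some (cs[r.toNat]'(by omega)) := by
      simp [PySem.List.pyGet?, PySem.List.pyIdx?, h3, hrl]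
    rw [hgl, hgr]
    -- decompose both slices
    have hleft : PySem.List.slice cs (some (l - (k+1:Nat) + 1)) (some (l + 1)) =
        PySem.List.slice cs (some ((l-1) - (k:Nat) + 1)) (some ((l-1) + 1)) ++ [cs[l.toNat]'(by omega)] := by
      have e1 : l - (k+1:Nat) + 1 = (l-1) - (k:Nat) + 1 := by push_cast; ring
      have e2 : (l-1) + 1 = l := by ring
      rw [e1, e2]
      exact pvSlice_snoc cs ((l-1) - (k:Nat) + 1) l (by push_cast at *; omega) (by push_cast at *; omega) h2
    have hright : PySem.List.slice cs (some r) (some (r + ((k:Nat)+1:Nat))) =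
        cs[r.toNat]'(by omega) :: PySem.List.slice cs (some (r + 1)) (some ((r + 1) + (k:Nat))) := by
      have := pvSlice_cons cs r k h3 hrl
      exact_mod_cast this
    rw [hleft, hright, List.reverse_append, List.reverse_singleton, List.singleton_append]
    by_cases hc : cs[l.toNat]'(by omega) = cs[r.toNat]'(by omega)
    · simp only [hc, ne_eq, not_true_eq_false, if_false]
      rw [ih (l-1) (r+1) (by omega) (by omega) (by omega) (by omega) (by omega)]
      simp [List.cons_beq_cons]
    · simp only [ne_eq, hc, not_false_iff, if_true]
      rw [List.cons_beq_cons]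
      simp [hc]

-- ===== VERDICT (by name: the statement is the Claim_ definition above) =====
theorem possiblePalindrome_spec : Claim_equal_possiblePalindrome := by
  intro l r s _ hpre
  unfold Spec_possiblePalindrome possiblePalindrome possiblePalindrome_alt
  set cs := s.toList with hcs
  by_cases hmain : 0 ≤ l ∧ l < (cs.length : Int) ∧ 0 ≤ r ∧ r < (cs.length : Int)
  · -- in-range expansion: n ≥ 1, use the loop lemma
    obtain ⟨hl0, hll, hr0, hrl⟩ := hmain
    have hnpos : 0 < min (l + 1) ((cs.length : Int) - r) := by omega
    have hmax : max 0 (min (l + 1) ((cs.length : Int) - r)) = min (l + 1) ((cs.length : Int) - r) := by omega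
    set m : Nat := (min (l + 1) ((cs.length : Int) - r)).toNat with hmdef
    have hm : min (l + 1) ((cs.length : Int) - r) = (m : Int) := by omega
    simp only [hm]
    exact pvLoop_eq_slices cs m l r (by omega) hll hr0 (by omega) hm
  · -- the loop never runs (left < 0 or right ≥ len): both sides are true
    have hdeg : l < 0 ∨ (cs.length : Int) ≤ r := by
      rcases hpre with h | h | ⟨h1, h2⟩ <;> simp only [← hcs] at * <;> omega
    have hn0 : max 0 (min (l + 1) ((cs.length : Int) - r)) = 0 := by omega
    simp only [hn0]
    have hcond : ¬ (0 ≤ l ∧ r < (cs.length : Int)) := by omega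
    rw [pvLoopA]
    simp only [hcond, dite_false]
    have e1 : l - 0 + 1 = l + 1 := by ring
    have e2 : r + 0 = r := by ring
    rw [e1, e2, pvSlice_self, pvSlice_self]
    rfl
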